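-- pv_equiv track=rewrite | github.com/eliaz5536/midi-ga | corpus/test.py | replacing_value_of_population_index
-- ===== SOURCE A (Python) =====
-- def replacing_value_of_population_index(population, new_five_individuals):
--     """Replaces a value from a specified index if the following candidate equates to 0
--
--     Args:
--         population (array): The order of the candidate selected from top five individual array
--         new_five_individuals (array): The new generated individuals for upcoming replacement for population
--
--     Returns:
--         array: Return the new population modified after replacement
--     """
--     j = 0
--     p = 0
--     while p < len(population):
--         if population[p] == 0:
--             population[p] = new_five_individuals[j]
--             j += 1
--         p += 1
--
--     return population
-- ===== SOURCE B (Python) =====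
-- def replacing_value_of_population_index(population, new_five_individuals):
--     zero_positions = [i for i, v in enumerate(population) if v == 0]
--     k = 0
--     for pos in zero_positions:
--         population[pos] = new_five_individuals[k]
--         k += 1
--     return population
-- ===== Notes on version B (the rewrite author's own statement) =====
-- stated objective: alternative
-- what changed: B first collects the list of zero indices with a comprehension and then assigns new individuals over that index list, instead of A's single while loop that scans every position with two hand-maintained counters.
import Mathlib
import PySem

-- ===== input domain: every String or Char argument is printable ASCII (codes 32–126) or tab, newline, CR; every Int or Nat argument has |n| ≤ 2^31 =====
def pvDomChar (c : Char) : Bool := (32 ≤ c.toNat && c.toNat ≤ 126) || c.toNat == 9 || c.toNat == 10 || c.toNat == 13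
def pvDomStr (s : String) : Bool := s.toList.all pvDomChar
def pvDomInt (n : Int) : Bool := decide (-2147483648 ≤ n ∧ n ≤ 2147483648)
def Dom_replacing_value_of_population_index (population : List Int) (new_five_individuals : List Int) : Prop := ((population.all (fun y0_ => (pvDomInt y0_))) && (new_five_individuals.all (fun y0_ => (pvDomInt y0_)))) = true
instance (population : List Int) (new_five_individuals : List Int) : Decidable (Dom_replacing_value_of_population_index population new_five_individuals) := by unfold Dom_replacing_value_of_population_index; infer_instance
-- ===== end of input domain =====

-- ===== PORT A =====
-- B differs from A only in decomposition (zero-index list first, then assignment pass); return-value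
-- equivalence proved; both Pythons mutate `population` in place identically.
-- fuel-indexed transliteration of A's `while p < len(population)` loop (fuel = population.length suffices)
def pvAGo (new_five_individuals : List Int) : Nat → List Int → Int → Int → List Int
  | 0, population, _, _ => population
  | fuel + 1, population, p, j =>
    if p < (population.length : Int) then
      if PySem.List.pyGetD population p 0 == 0 then
        pvAGo new_five_individuals fuel
          (PySem.List.pySetD population p (PySem.List.pyGetD new_five_individuals j 0)) (p + 1) (j + 1)
      else pvAGo new_five_individuals fuel population (p + 1) j
    else population

def replacing_value_of_population_index (population : List Int) (new_five_individuals : List Int) : List Int :=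
  pvAGo new_five_individuals population.length population 0 0

-- ===== PORT B =====
-- population[pos] = new_five_individuals[k]; k += 1
def pvBStep (new_five_individuals : List Int) (st : List Int × Int) (pos : Int) : List Int × Int :=
  (PySem.List.pySetD st.1 pos (PySem.List.pyGetD new_five_individuals st.2 0), st.2 + 1)

def replacing_value_of_population_index_alt (population : List Int) (new_five_individuals : List Int) : List Int :=
  let zero_positions := ((PySem.List.enumerate population).filter (fun iv => iv.2 == 0)).map Prod.fst
  (zero_positions.foldl (pvBStep new_five_individuals) (population, 0)).1

-- ===== PRECONDITION & SPEC =====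
-- Pre_ excludes exactly the inputs on which `new_five_individuals[j]` is out of range, where both
-- A and B raise IndexError (more zeros in the population than replacement individuals).
def Pre_replacing_value_of_population_index (population : List Int) (new_five_individuals : List Int) : Prop :=
  population.count 0 ≤ new_five_individuals.length
instance (population : List Int) (new_five_individuals : List Int) : Decidable (Pre_replacing_value_of_population_index population new_five_individuals) := by unfold Pre_replacing_value_of_population_index; infer_instance

def pvWitness_replacing_value_of_population_index : List Int × List Int := ([0, 3, 0, 1], [7, 9])

def Spec_replacing_value_of_population_index (population : List Int) (new_five_individuals : List Int) (out : List Int) : Prop := out = replacing_value_of_population_index_alt population new_five_individuals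
instance (population : List Int) (new_five_individuals : List Int) (out : List Int) : Decidable (Spec_replacing_value_of_population_index population new_five_individuals out) := by unfold Spec_replacing_value_of_population_index; infer_instance

-- ===== CLAIM (what is proved, stated in full; the proofs are below) =====
def Claim_equal_replacing_value_of_population_index : Prop := ∀ (population : List Int) (new_five_individuals : List Int), Dom_replacing_value_of_population_index population new_five_individuals → Pre_replacing_value_of_population_index population new_five_individuals → Spec_replacing_value_of_population_index population new_five_individuals (replacing_value_of_population_index population new_five_individuals)

-- ===== LEMMAS AND PROOFS =====

-- the common normal form: the p-th zero of the population is replaced by new[j + p]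
def pvS (new_five_individuals : List Int) : List Int → Int → List Int
  | [], _ => []
  | x :: t, j =>
    if x = 0 then PySem.List.pyGetD new_five_individuals j 0 :: pvS new_five_individuals t (j + 1)
    else x :: pvS new_five_individuals t j

theorem pvAGo_eq_pvS (new : List Int) (t : List Int) :
    ∀ (pre : List Int) (j : Int),
      pvAGo new t.length (pre ++ t) (pre.length : Int) j = pre ++ pvS new t j := by
  induction t with
  | nil => intro pre j; simp [pvAGo, pvS]
  | cons x r ih =>
    intro pre j
    have hlt : (pre.length : Int) < ((pre ++ x :: r).length : Int) := by simp
    have hget : PySem.List.pyGetD (pre ++ x :: r) (pre.length : Int) 0 = x := by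
      simp [PySem.List.pyGetD_natCast, List.getD]
    by_cases hx : x = 0
    · subst hx
      have hset : PySem.List.pySetD (pre ++ (0:Int) :: r) (pre.length : Int) (PySem.List.pyGetD new j 0)
          = (pre ++ [PySem.List.pyGetD new j 0]) ++ r := by simp
      have hlen : (pre.length : Int) + 1 = ((pre ++ [PySem.List.pyGetD new j 0]).length : Int) := by
        simp
      simp only [List.length_cons, pvAGo]
      rw [if_pos hlt, hget]
      simp only [beq_self_eq_true, if_true]
      rw [hset, hlen, ih (pre ++ [PySem.List.pyGetD new j 0]) (j + 1)]
      simp [pvS]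
    · have hbeq : (x == (0:Int)) = false := by simpa using hx
      have hres : pre ++ x :: r = (pre ++ [x]) ++ r := by simp
      have hlen : (pre.length : Int) + 1 = ((pre ++ [x]).length : Int) := by simp
      simp only [List.length_cons, pvAGo]
      rw [if_pos hlt, hget, hbeq]
      simp only [Bool.false_eq_true, if_false]
      rw [hres, hlen, ih (pre ++ [x]) j]
      simp [pvS, hx]

theorem pvB_eq_pvS (new : List Int) (t : List Int) :
    ∀ (pre : List Int) (k : Int),
      (((PySem.List.enumerate t (pre.length : Int)).filter (fun iv => iv.2 == 0)).map Prod.fst).foldl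
        (pvBStep new) (pre ++ t, k)
      = (pre ++ pvS new t k, k + (t.count 0 : Int)) := by
  induction t with
  | nil => intro pre k; simp [PySem.List.enumerate_nil, pvS]
  | cons x r ih =>
    intro pre k
    by_cases hx : x = 0
    · subst hx
      have hset : PySem.List.pySetD (pre ++ (0:Int) :: r) (pre.length : Int) (PySem.List.pyGetD new k 0)
          = (pre ++ [PySem.List.pyGetD new k 0]) ++ r := by simp
      have hlen : (pre.length : Int) + 1 = ((pre ++ [PySem.List.pyGetD new k 0]).length : Int) := by simp
      simp only [PySem.List.enumerate_cons, List.filter_cons, beq_self_eq_true, if_true,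
        List.map_cons, List.foldl_cons]
      show (((PySem.List.enumerate r ((pre.length : Int) + 1)).filter (fun iv => iv.2 == 0)).map Prod.fst).foldl
        (pvBStep new) (pvBStep new (pre ++ (0:Int) :: r, k) (pre.length : Int)) = _
      rw [show pvBStep new (pre ++ (0:Int) :: r, k) (pre.length : Int)
            = ((pre ++ [PySem.List.pyGetD new k 0]) ++ r, k + 1) by simp [pvBStep, hset]]
      rw [hlen, ih (pre ++ [PySem.List.pyGetD new k 0]) (k + 1)]
      simp [pvS]
      omega
    · have hbeq : (x == (0:Int)) = false := by simpa using hx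
      have hres : pre ++ x :: r = (pre ++ [x]) ++ r := by simp
      have hlen : (pre.length : Int) + 1 = ((pre ++ [x]).length : Int) := by simp
      simp only [PySem.List.enumerate_cons, List.filter_cons, hbeq, Bool.false_eq_true, if_false]
      rw [hres, hlen, ih (pre ++ [x]) k]
      simp [pvS, hx]

-- ===== VERDICT (by name: the statement is the Claim_ definition above) =====
theorem replacing_value_of_population_index_spec : Claim_equal_replacing_value_of_population_index := by
  intro population new _ _
  unfold Spec_replacing_value_of_population_index
  unfold replacing_value_of_population_index replacing_value_of_population_index_alt
  have hA := pvAGo_eq_pvS new population [] 0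
  have hB := pvB_eq_pvS new population [] 0
  simp only [List.nil_append, List.length_nil, Int.natCast_zero] at hA hB
  rw [hA]
  simp only [hB]
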